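-- pv_equiv track=rewrite | github.com/PolyArch/loom | tools/loom/mapper_benchmark.py | strip_mapper_base_config_args
-- ===== SOURCE A (Python) =====
-- def strip_mapper_base_config_args(args: list[str]) -> list[str]:
--     filtered: list[str] = []
--     skip_next = False
--     for token in args:
--         if skip_next:
--             skip_next = False
--             continue
--         if token == "--mapper-base-config":
--             skip_next = True
--             continue
--         if token.startswith("--mapper-base-config="):
--             continue
--         filtered.append(token)
--     return filtered
-- ===== SOURCE B (Python) =====
-- def strip_mapper_base_config_args(args: list[str]) -> list[str]:
--     # Divide and conquer on the first offending token: keep the clean prefix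
--     # wholesale, cut the flag (with its value) or the inline form, recurse on
--     # the remaining suffix.
--     for i, tok in enumerate(args):
--         if tok == "--mapper-base-config":
--             return args[:i] + strip_mapper_base_config_args(args[i + 2:])
--         if tok.startswith("--mapper-base-config="):
--             return args[:i] + strip_mapper_base_config_args(args[i + 1:])
--     return list(args)
-- ===== Notes on version B (the rewrite author's own statement) =====
-- stated objective: alternative
-- what changed: Replaced A's single-pass skip_next state machine with a divide-and-conquer recursion: find the first offending token, keep the clean prefix wholesale via slicing, cut the flag (plus its value) or the inline form, and recurse on the remaining suffix.
import Mathlib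
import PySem

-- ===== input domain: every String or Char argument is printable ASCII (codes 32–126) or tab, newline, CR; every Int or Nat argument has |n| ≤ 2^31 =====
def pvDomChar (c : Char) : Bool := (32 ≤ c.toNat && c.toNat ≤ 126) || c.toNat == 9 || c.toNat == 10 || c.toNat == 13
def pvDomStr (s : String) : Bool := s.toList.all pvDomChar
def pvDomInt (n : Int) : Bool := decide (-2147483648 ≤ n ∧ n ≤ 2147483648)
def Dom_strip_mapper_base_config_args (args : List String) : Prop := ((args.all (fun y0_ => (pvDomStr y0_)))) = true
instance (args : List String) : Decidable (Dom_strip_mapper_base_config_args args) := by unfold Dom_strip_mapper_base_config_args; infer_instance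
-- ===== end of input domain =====

-- B replaces A's single-pass skip_next state machine with a divide-and-conquer
-- recursion: find the first offending token, keep the clean prefix by slicing,
-- cut it (and its value), recurse on the suffix (alternative decomposition).


-- ===== PORT A =====
-- fold over the tokens carrying (filtered, skip_next), exactly A's loop
def stripAStep (st : List String × Bool) (token : String) : List String × Bool :=
  if st.2 then (st.1, false)
  else if token = "--mapper-base-config" then (st.1, true)
  else if PySem.Str.startswith token "--mapper-base-config=" then st
  else (st.1 ++ [token], false)

def strip_mapper_base_config_args (args : List String) : List String :=
  (args.foldl stripAStep ([], false)).1

-- ===== PORT B =====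
-- B's 'for i, tok in enumerate(args)' with early returns: scan for the first
-- offending token, reporting its index and whether it is the bare flag (true)
-- or the inline '--mapper-base-config=…' form (false)
def stripBFind : List String → Nat → Option (Nat × Bool)
  | [], _ => none
  | t :: rs, i =>
    if t = "--mapper-base-config" then some (i, true)
    else if PySem.Str.startswith t "--mapper-base-config=" then some (i, false)
    else stripBFind rs (i + 1)

-- (termination of the port) the index found is within bounds
theorem stripBFind_lt : ∀ (xs : List String) (k i : Nat) (b : Bool),
    stripBFind xs k = some (i, b) → k ≤ i ∧ i < k + xs.length := by
  intro xs
  induction xs with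
  | nil => intro k i b h; simp [stripBFind] at h
  | cons t rs ih =>
    intro k i b h
    simp only [stripBFind] at h
    split at h
    · cases h; simp only [List.length_cons]; omega
    · split at h
      · cases h; simp only [List.length_cons]; omega
      · have := ih (k + 1) i b h; simp only [List.length_cons]; omega

-- keep the clean prefix args[:i] wholesale, recurse on args[i+2:] / args[i+1:]
def strip_mapper_base_config_args_alt (args : List String) : List String :=
  match h : stripBFind args 0 with
  | none => args
  | some (i, true) =>
    PySem.List.slice args none (some (i : Int)) ++
      strip_mapper_base_config_args_alt (PySem.List.slice args (some ((i : Int) + 2)) none)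
  | some (i, false) =>
    PySem.List.slice args none (some (i : Int)) ++
      strip_mapper_base_config_args_alt (PySem.List.slice args (some ((i : Int) + 1)) none)
termination_by args.length
decreasing_by
  · have hi := stripBFind_lt args 0 i true h
    have e : ((i : Int) + 2) = ((i + 2 : Nat) : Int) := by push_cast; ring
    rw [e, PySem.List.slice_from_natCast]
    simp only [List.length_drop]; omega
  · have hi := stripBFind_lt args 0 i false h
    have e : ((i : Int) + 1) = ((i + 1 : Nat) : Int) := by push_cast; ring
    rw [e, PySem.List.slice_from_natCast]
    simp only [List.length_drop]; omega

-- ===== PRECONDITION & SPEC =====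
def Spec_strip_mapper_base_config_args (args : List String) (out : List String) : Prop := out = strip_mapper_base_config_args_alt args
instance (args : List String) (out : List String) : Decidable (Spec_strip_mapper_base_config_args args out) := by unfold Spec_strip_mapper_base_config_args; infer_instance

-- ===== CLAIM (what is proved, stated in full; the proofs are below) =====
def Claim_equal_strip_mapper_base_config_args : Prop := ∀ (args : List String), Dom_strip_mapper_base_config_args args → Spec_strip_mapper_base_config_args args (strip_mapper_base_config_args args)

-- ===== LEMMAS AND PROOFS =====

-- reference state machine: exactly A's control flow, as structural recursion
def refStrip : Bool → List String → List String
  | _, [] => []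
  | true, _ :: rs => refStrip false rs
  | false, t :: rs =>
    if t = "--mapper-base-config" then refStrip true rs
    else if PySem.Str.startswith t "--mapper-base-config=" then refStrip false rs
    else t :: refStrip false rs

theorem stripA_eq_ref : ∀ (args acc : List String) (skip : Bool),
    (args.foldl stripAStep (acc, skip)).1 = acc ++ refStrip skip args := by
  intro args
  induction args with
  | nil => intro acc skip; cases skip <;> simp [refStrip]
  | cons t rs ih =>
    intro acc skip
    cases skip with
    | true => simp only [List.foldl, stripAStep]; rw [ih]; rfl
    | false =>
      by_cases hf : t = "--mapper-base-config"
      · simp only [List.foldl, stripAStep, if_neg (Bool.false_ne_true), if_pos hf]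
        rw [ih acc true]
        simp only [refStrip, if_pos hf]
      · by_cases hp : PySem.Str.startswith t "--mapper-base-config=" = true
        · simp only [List.foldl, stripAStep, refStrip, if_neg hf, if_pos hp]
          simp only [if_neg (Bool.false_ne_true)]
          rw [ih]
        · simp only [List.foldl, stripAStep, refStrip, if_neg hf,
            if_neg (Bool.false_ne_true), Bool.not_eq_true] at *
          simp only [hp, if_neg (Bool.false_ne_true)]
          rw [ih (acc ++ [t]) false]
          simp

theorem ref_of_find_none : ∀ (xs : List String) (k : Nat),
    stripBFind xs k = none → refStrip false xs = xs := by
  intro xs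
  induction xs with
  | nil => intro k _; rfl
  | cons t rs ih =>
    intro k h
    simp only [stripBFind] at h
    split at h
    · exact absurd h (by simp)
    · split at h
      · exact absurd h (by simp)
      · rename_i hf hp
        simp only [refStrip, if_neg hf, if_neg hp]
        rw [ih (k + 1) h]

theorem find_some_decomp : ∀ (xs : List String) (k i : Nat) (b : Bool),
    stripBFind xs k = some (i, b) →
    ∃ p t s, xs = p ++ t :: s ∧ p.length = i - k ∧ k ≤ i ∧
      (∀ u ∈ p, u ≠ "--mapper-base-config" ∧ ¬ PySem.Str.startswith u "--mapper-base-config=" = true) ∧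
      (if b then t = "--mapper-base-config"
       else t ≠ "--mapper-base-config" ∧ PySem.Str.startswith t "--mapper-base-config=" = true) := by
  intro xs
  induction xs with
  | nil => intro k i b h; simp [stripBFind] at h
  | cons t rs ih =>
    intro k i b h
    simp only [stripBFind] at h
    split at h
    · rename_i hf
      cases h
      exact ⟨[], t, rs, by simp, by simp, le_refl _, by simp, hf⟩
    · split at h
      · rename_i hf hp
        cases h
        exact ⟨[], t, rs, by simp, by simp, le_refl _, by simp, ⟨hf, hp⟩⟩
      · rename_i hf hp
        obtain ⟨p, t', s, hxs, hlen, hki, hclean, hb⟩ := ih (k + 1) i b h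
        refine ⟨t :: p, t', s, by simp [hxs], by simp [hlen]; omega, by omega, ?_, hb⟩
        intro u hu
        rcases List.mem_cons.mp hu with rfl | hu
        · exact ⟨hf, hp⟩
        · exact hclean u hu

theorem ref_clean_append : ∀ (p ys : List String),
    (∀ u ∈ p, u ≠ "--mapper-base-config" ∧ ¬ PySem.Str.startswith u "--mapper-base-config=" = true) →
    refStrip false (p ++ ys) = p ++ refStrip false ys := by
  intro p
  induction p with
  | nil => intro ys _; rfl
  | cons u p ih =>
    intro ys h
    have hu := h u (List.mem_cons_self)
    simp only [List.cons_append, refStrip, if_neg hu.1, if_neg hu.2]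
    rw [ih ys (fun v hv => h v (List.mem_cons_of_mem _ hv))]

theorem ref_flag : ∀ (s : List String),
    refStrip false ("--mapper-base-config" :: s) = refStrip false (s.drop 1) := by
  intro s
  cases s <;> simp [refStrip]

-- unfolding equations for the well-founded port of B
theorem alt_eq_none (args : List String) (h : stripBFind args 0 = none) :
    strip_mapper_base_config_args_alt args = args := by
  rw [strip_mapper_base_config_args_alt]
  split
  · rfl
  · rename_i h'; rw [h'] at h; cases h
  · rename_i h'; rw [h'] at h; cases h

theorem alt_eq_flag (args : List String) (i : Nat) (h : stripBFind args 0 = some (i, true)) :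
    strip_mapper_base_config_args_alt args =
      PySem.List.slice args none (some (i : Int)) ++
        strip_mapper_base_config_args_alt (PySem.List.slice args (some ((i : Int) + 2)) none) := by
  rw [strip_mapper_base_config_args_alt]
  split
  · rename_i h'; rw [h'] at h; cases h
  · rename_i h'; rw [h'] at h; cases h; rfl
  · rename_i h'; rw [h'] at h; cases h

theorem alt_eq_inline (args : List String) (i : Nat) (h : stripBFind args 0 = some (i, false)) :
    strip_mapper_base_config_args_alt args =
      PySem.List.slice args none (some (i : Int)) ++
        strip_mapper_base_config_args_alt (PySem.List.slice args (some ((i : Int) + 1)) none) := by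
  rw [strip_mapper_base_config_args_alt]
  split
  · rename_i h'; rw [h'] at h; cases h
  · rename_i h'; rw [h'] at h; cases h
  · rename_i h'; rw [h'] at h; cases h; rfl

theorem ref_eq_alt : ∀ (args : List String),
    refStrip false args = strip_mapper_base_config_args_alt args := by
  intro args
  induction args using strip_mapper_base_config_args_alt.induct with
  | case1 args h =>
    rw [alt_eq_none args h]
    exact ref_of_find_none args 0 h
  | case2 args i h ih =>
    rw [alt_eq_flag args i h]
    obtain ⟨p, t, s, hxs, hlen, _, hclean, hb⟩ := find_some_decomp args 0 i true h
    simp only [if_true] at hb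
    subst hb
    have hlen' : p.length = i := by omega
    have hslice1 : PySem.List.slice args none (some (i : Int)) = p := by
      rw [PySem.List.slice_to_natCast, hxs, ← hlen', List.take_left]
    have hslice2 : PySem.List.slice args (some ((i : Int) + 2)) none = s.drop 1 := by
      have e : ((i : Int) + 2) = ((i + 2 : Nat) : Int) := by push_cast; ring
      rw [e, PySem.List.slice_from_natCast, hxs, ← hlen',
        show p.length + 2 = p.length + (1 + 1) from rfl, ← List.drop_drop, ← List.drop_drop]
      simp
    rw [hslice2] at ih
    rw [hslice1, hslice2, hxs, ref_clean_append p _ hclean, ref_flag, ih]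
  | case3 args i h ih =>
    rw [alt_eq_inline args i h]
    obtain ⟨p, t, s, hxs, hlen, _, hclean, hb⟩ := find_some_decomp args 0 i false h
    simp only [if_false, Bool.false_eq_true] at hb
    have hlen' : p.length = i := by omega
    have hslice1 : PySem.List.slice args none (some (i : Int)) = p := by
      rw [PySem.List.slice_to_natCast, hxs, ← hlen', List.take_left]
    have hslice2 : PySem.List.slice args (some ((i : Int) + 1)) none = s := by
      have e : ((i : Int) + 1) = ((i + 1 : Nat) : Int) := by push_cast; ring
      rw [e, PySem.List.slice_from_natCast, hxs, ← hlen', ← List.drop_drop]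
      simp
    rw [hslice2] at ih
    rw [hslice1, hslice2, hxs, ref_clean_append p _ hclean]
    simp only [refStrip, if_neg hb.1, if_pos hb.2]
    rw [ih]

-- ===== VERDICT (by name: the statement is the Claim_ definition above) =====
theorem strip_mapper_base_config_args_spec : Claim_equal_strip_mapper_base_config_args := by
  intro args _
  show strip_mapper_base_config_args args = strip_mapper_base_config_args_alt args
  unfold strip_mapper_base_config_args
  rw [stripA_eq_ref args [] false, ref_eq_alt]
  rfl
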